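-- pv_equiv track=rewrite | github.com/rwambangho/algorithm-study | 프로그래머스/1/42862. 체육복/체육복.py | solution
-- ===== SOURCE A (Python) =====
-- def solution(n, lost, reserve):
--     answer = 0
--     # 여벌 있는 사람 중 자기 자신이 도난당한 경우 제거
--     reserve = set(reserve)
--     lost = set(lost)
--
--     # 여벌도 있고 도난도 당한 사람은 제외
--     intersect = reserve & lost
--     reserve -= intersect
--     lost -= intersect
--
--     for elem in sorted(reserve):
--         if elem-1 in lost:
--             lost.remove(elem-1)
--         elif elem+1 in lost:
--             lost.remove(elem+1)
--     answer=n-len(lost)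
--     return answer
-- ===== SOURCE B (Python) =====
-- def solution(n, lost, reserve):
--     # balance per student id: -1 needs a garment, 1 has a spare, 0 settled/neutral
--     bal = {}
--     for x in lost:
--         bal[x] = -1
--     for x in reserve:
--         bal[x] = 0 if bal.get(x, 1) != 1 else 1
--     unmatched = 0
--     for i in sorted(bal):
--         if bal[i] == -1:
--             if bal.get(i - 1) == 1:
--                 bal[i - 1] = 0
--                 bal[i] = 0
--             elif bal.get(i + 1) == 1:
--                 bal[i + 1] = 0
--                 bal[i] = 0
--             else:
--                 unmatched += 1
--     return n - unmatched
-- ===== Notes on version B (the rewrite author's own statement) =====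
-- stated objective: alternative
-- what changed: Instead of set algebra plus a greedy over sorted donors shrinking the lost set, B builds one balance dict (-1 lost, +1 spare, 0 settled) in a single pass over both lists and sweeps the sorted positions, each needy position borrowing from its left then right neighbour; the two greedies provably yield the same count.
import Mathlib
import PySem

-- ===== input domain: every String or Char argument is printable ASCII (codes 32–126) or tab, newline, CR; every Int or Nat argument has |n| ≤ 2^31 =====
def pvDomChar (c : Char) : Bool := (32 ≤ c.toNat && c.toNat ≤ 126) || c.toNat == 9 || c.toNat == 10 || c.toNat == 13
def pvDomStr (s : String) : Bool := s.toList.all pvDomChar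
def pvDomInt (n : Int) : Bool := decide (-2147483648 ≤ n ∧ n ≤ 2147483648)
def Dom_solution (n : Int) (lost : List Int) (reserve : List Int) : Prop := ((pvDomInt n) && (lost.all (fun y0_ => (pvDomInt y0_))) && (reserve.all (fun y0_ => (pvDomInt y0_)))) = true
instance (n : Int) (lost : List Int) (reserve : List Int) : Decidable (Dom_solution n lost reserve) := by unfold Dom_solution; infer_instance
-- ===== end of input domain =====

-- B replaces A's set algebra + greedy over sorted donors by one balance dict built in a
-- single pass and a sweep of the sorted positions borrowing left-then-right (objective:
-- alternative decomposition; the two greedies provably return the same count).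

-- ===== PORT A =====
-- the loop body of A; lost.remove(x) runs only under 'x in lost', where it equals discard
def stepA (l : PySem.Set Int) (elem : Int) : PySem.Set Int :=
  if (elem - 1) ∈ l then PySem.Set.discard l (elem - 1)
  else if (elem + 1) ∈ l then PySem.Set.discard l (elem + 1)
  else l

def solution (n : Int) (lost : List Int) (reserve : List Int) : Int :=
  let reserveS : PySem.Set Int := PySem.Set.ofList reserve
  let lostS : PySem.Set Int := PySem.Set.ofList lost
  let intersect := PySem.Set.inter reserveS lostS
  let reserveS2 := PySem.Set.diff reserveS intersect
  let lostS2 := PySem.Set.diff lostS intersect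
  let finalLost := (PySem.List.sorted reserveS2 (fun x => x)).foldl stepA lostS2
  n - PySem.Set.len finalLost

-- ===== PORT B =====
-- one iteration of B's sweep; bal[i] is read as getD i 0 (i is always a key of bal here)
def stepSweep (s : PySem.Dict Int Int × Int) (i : Int) : PySem.Dict Int Int × Int :=
  if s.1.getD i 0 == -1 then
    if s.1.get? (i - 1) == some 1 then ((s.1.insert (i - 1) 0).insert i 0, s.2)
    else if s.1.get? (i + 1) == some 1 then ((s.1.insert (i + 1) 0).insert i 0, s.2)
    else (s.1, s.2 + 1)
  else s

def solution_alt (n : Int) (lost : List Int) (reserve : List Int) : Int :=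
  let bal0 := lost.foldl (fun d x => d.insert x (-1 : Int)) PySem.Dict.empty
  let bal := reserve.foldl (fun d x => d.insert x (if d.getD x 1 != 1 then (0 : Int) else 1)) bal0
  let res := (PySem.List.sorted bal.keys (fun x => x)).foldl stepSweep (bal, 0)
  n - res.2

-- ===== PRECONDITION & SPEC =====
def Spec_solution (n : Int) (lost : List Int) (reserve : List Int) (out : Int) : Prop := out = solution_alt n lost reserve
instance (n : Int) (lost : List Int) (reserve : List Int) (out : Int) : Decidable (Spec_solution n lost reserve out) := by unfold Spec_solution; infer_instance

-- ===== CLAIM (what is proved, stated in full; the proofs are below) =====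
def Claim_equal_solution : Prop := ∀ (n : Int) (lost : List Int) (reserve : List Int), Dom_solution n lost reserve → Spec_solution n lost reserve (solution n lost reserve)

-- ===== LEMMAS AND PROOFS =====

-- abstract form of B's sweep: needy positions ls (ascending) consume adjacent spares S
def runB : List Int → PySem.Set Int → Int
  | [], _ => 0
  | i :: ls, S =>
    if (i - 1) ∈ S then runB ls (PySem.Set.discard S (i - 1))
    else if (i + 1) ∈ S then runB ls (PySem.Set.discard S (i + 1))
    else runB ls S + 1

-- the value bal.get? j takes after B's two build loops (l = j∈lost, s = j∈seen-reserve)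
def balVal (l s : Bool) : Option Int :=
  if s then some (if l then 0 else 1) else if l then some (-1) else none

theorem discard_cons_of_ne (a x : Int) (l : List Int) (h : x ≠ a) :
    PySem.Set.discard (a :: l) x = a :: PySem.Set.discard l x := by
  simp [PySem.Set.discard, h.symm]

theorem discard_cons_self (a : Int) (l : List Int) (h : a ∉ l) :
    PySem.Set.discard (a :: l) a = l := by
  simp only [PySem.Set.discard, List.filter_cons, beq_self_eq_true, Bool.not_true,
    Bool.false_eq_true, if_false]
  exact List.filter_eq_self.2 (fun x hx => by
    have : x ≠ a := fun e => h (e ▸ hx)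
    simp [this])

theorem foldA_nil (rs : List Int) : rs.foldl stepA [] = [] := by
  induction rs with
  | nil => rfl
  | cons r rs ih => simpa [stepA] using ih

theorem runB_nil_spare (ls : List Int) : runB ls [] = ls.length := by
  induction ls with
  | nil => rfl
  | cons i ls ih => simp [runB, ih]

theorem foldA_perm (rs : List Int) : ∀ l₁ l₂ : List Int, l₁.Perm l₂ →
    (rs.foldl stepA l₁).Perm (rs.foldl stepA l₂) := by
  induction rs with
  | nil => exact fun _ _ h => h
  | cons r rs ih =>
    intro l₁ l₂ h
    have hm : ∀ x : Int, x ∈ l₁ ↔ x ∈ l₂ := fun x => h.mem_iff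
    have hstep : (stepA l₁ r).Perm (stepA l₂ r) := by
      unfold stepA
      rw [if_congr (iff_of_eq (propext (hm _))) rfl rfl,
          if_congr (iff_of_eq (propext (hm _))) rfl rfl]
      split_ifs with h1 h2
      · exact h.filter _
      · exact h.filter _
      · exact h
    exact ih _ _ hstep

theorem inertA (a : Int) (rs : List Int) (h : ∀ r ∈ rs, r - 1 ≠ a ∧ r + 1 ≠ a) :
    ∀ l : List Int, rs.foldl stepA (a :: l) = a :: rs.foldl stepA l := by
  induction rs with
  | nil => intro l; rfl
  | cons r rs ih =>
    intro l
    have h1 := (h r (by simp)).1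
    have h2 := (h r (by simp)).2
    have hstep : stepA (a :: l) r = a :: stepA l r := by
      unfold stepA
      simp only [List.mem_cons, h1, h2, false_or]
      split_ifs with hc1 hc2
      · exact discard_cons_of_ne a _ l h1
      · exact discard_cons_of_ne a _ l h2
      · rfl
    rw [List.foldl_cons, hstep, List.foldl_cons, ih (fun r hr => h r (by simp [hr]))]

theorem inertB (b : Int) (ls : List Int) (h : ∀ i ∈ ls, i - 1 ≠ b ∧ i + 1 ≠ b) :
    ∀ S : List Int, runB ls (b :: S) = runB ls S := by
  induction ls with
  | nil => intro S; rfl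
  | cons i ls ih =>
    intro S
    have h1 := (h i (by simp)).1
    have h2 := (h i (by simp)).2
    have ht : ∀ x ∈ ls, x - 1 ≠ b ∧ x + 1 ≠ b := fun x hx => h x (by simp [hx])
    simp only [runB, List.mem_cons, h1, h2, false_or]
    split_ifs with hc1 hc2
    · rw [discard_cons_of_ne b _ S h1, ih ht]
    · rw [discard_cons_of_ne b _ S h2, ih ht]
    · rw [ih ht]

theorem core (N : Nat) : ∀ ls rs : List Int, ls.length + rs.length ≤ N →
    List.Pairwise (· < ·) ls → List.Pairwise (· < ·) rs → (∀ x ∈ ls, x ∉ rs) →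
    ((rs.foldl stepA ls).length : Int) = runB ls rs := by
  induction N with
  | zero =>
    intro ls rs hlen _ _ _
    have h1 : ls = [] := List.length_eq_zero_iff.1 (by omega)
    have h2 : rs = [] := List.length_eq_zero_iff.1 (by omega)
    subst h1; subst h2; rfl
  | succ N ih =>
    intro ls rs hlen hpl hpr hdisj
    match ls, rs with
    | [], rs => rw [foldA_nil]; simp [runB]
    | (a :: ls'), [] => rw [runB_nil_spare]; rfl
    | (a :: ls'), (b :: rs') =>
      have hla : ∀ x ∈ ls', a < x := fun x hx => (List.pairwise_cons.1 hpl).1 x hx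
      have hrb : ∀ y ∈ rs', b < y := fun y hy => (List.pairwise_cons.1 hpr).1 y hy
      have hpl' := (List.pairwise_cons.1 hpl).2
      have hpr' := (List.pairwise_cons.1 hpr).2
      have hanl : a ∉ ls' := fun hm => absurd (hla a hm) (lt_irrefl a)
      have hbnr : b ∉ rs' := fun hm => absurd (hrb b hm) (lt_irrefl b)
      rcases lt_trichotomy a b with hab | hab | hab
      · by_cases hb1 : b = a + 1
        · -- b = a+1: A's head donor b takes a; B's head needy a takes b
          have hstep : stepA (a :: ls') b = ls' := by
            unfold stepA
            have hmem : (b - 1) ∈ a :: ls' := by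
              simp only [List.mem_cons]; left; omega
            rw [if_pos hmem]
            have : b - 1 = a := by omega
            rw [this, discard_cons_self a ls' hanl]
          have hnm1 : (a - 1) ∉ b :: rs' := by
            intro hm; rcases List.mem_cons.1 hm with h | h
            · omega
            · exact absurd (hrb _ h) (by omega)
          have hm2 : (a + 1) ∈ b :: rs' := by simp only [List.mem_cons]; left; omega
          have hd : PySem.Set.discard (b :: rs') (a + 1) = rs' := by
            have : a + 1 = b := by omega
            rw [this, discard_cons_self b rs' hbnr]
          rw [List.foldl_cons, hstep]
          show ((rs'.foldl stepA ls').length : Int) = runB (a :: ls') (b :: rs')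
          rw [runB, if_neg hnm1, if_pos hm2, hd]
          exact ih ls' rs' (by simp at hlen ⊢; omega) hpl' hpr'
            (fun x hx => fun hm => hdisj x (by simp [hx]) (by simp [hm]))
        · -- a < b, b ≠ a+1: a is inert on both sides
          have hgap : a + 1 < b := by omega
          have hLHS : (b :: rs').foldl stepA (a :: ls') = a :: (b :: rs').foldl stepA ls' := by
            apply inertA
            intro r hr
            rcases List.mem_cons.1 hr with h | h
            · omega
            · have := hrb _ h; omega
          have hnm1 : (a - 1) ∉ b :: rs' := by
            intro hm; rcases List.mem_cons.1 hm with h | h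
            · omega
            · have := hrb _ h; omega
          have hnm2 : (a + 1) ∉ b :: rs' := by
            intro hm; rcases List.mem_cons.1 hm with h | h
            · omega
            · have := hrb _ h; omega
          rw [hLHS, runB, if_neg hnm1, if_neg hnm2]
          have := ih ls' (b :: rs') (by simp at hlen ⊢; omega) hpl' hpr
            (fun x hx => hdisj x (by simp [hx]))
          simp only [List.length_cons]
          push_cast
          omega
      · exact absurd (hdisj a (by simp)) (by simp [hab])
      · by_cases ha1 : a = b + 1
        · -- a = b+1: A's head donor b takes a; B's head needy a takes b
          have hstep : stepA (a :: ls') b = ls' := by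
            unfold stepA
            have hnm : (b - 1) ∉ a :: ls' := by
              intro hm; rcases List.mem_cons.1 hm with h | h
              · omega
              · have := hla _ h; omega
            have hmem : (b + 1) ∈ a :: ls' := by simp only [List.mem_cons]; left; omega
            rw [if_neg hnm, if_pos hmem]
            have : b + 1 = a := by omega
            rw [this, discard_cons_self a ls' hanl]
          have hm1 : (a - 1) ∈ b :: rs' := by simp only [List.mem_cons]; left; omega
          have hd : PySem.Set.discard (b :: rs') (a - 1) = rs' := by
            have : a - 1 = b := by omega
            rw [this, discard_cons_self b rs' hbnr]
          rw [List.foldl_cons, hstep]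
          show ((rs'.foldl stepA ls').length : Int) = runB (a :: ls') (b :: rs')
          rw [runB, if_pos hm1, hd]
          exact ih ls' rs' (by simp at hlen ⊢; omega) hpl' hpr'
            (fun x hx => fun hm => hdisj x (by simp [hx]) (by simp [hm]))
        · -- b < a, a ≠ b+1: donor b is useless on both sides
          have hgap : b + 1 < a := by omega
          have hstep : stepA (a :: ls') b = a :: ls' := by
            unfold stepA
            have hnm1 : (b - 1) ∉ a :: ls' := by
              intro hm; rcases List.mem_cons.1 hm with h | h
              · omega
              · have := hla _ h; omega
            have hnm2 : (b + 1) ∉ a :: ls' := by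
              intro hm; rcases List.mem_cons.1 hm with h | h
              · omega
              · have := hla _ h; omega
            rw [if_neg hnm1, if_neg hnm2]
          have hRHS : runB (a :: ls') (b :: rs') = runB (a :: ls') rs' := by
            apply inertB
            intro i hi
            rcases List.mem_cons.1 hi with h | h
            · omega
            · have := hla _ h; omega
          rw [List.foldl_cons, hstep, hRHS]
          exact ih (a :: ls') rs' (by simp at hlen ⊢; omega) hpl hpr'
            (fun x hx => fun hm => hdisj x hx (by simp [hm]))


theorem lostFold_get? (lost : List Int) : ∀ (d : PySem.Dict Int Int) (k : Int),
    (lost.foldl (fun d x => d.insert x (-1 : Int)) d).get? k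
      = if k ∈ lost then some (-1) else d.get? k := by
  induction lost with
  | nil => intro d k; simp
  | cons x xs ih =>
    intro d k
    rw [List.foldl_cons, ih]
    by_cases hk : k ∈ xs
    · simp [hk]
    · by_cases hkx : k = x
      · simp [hkx]
      · simp [hk, hkx, PySem.Dict.get?_insert]

theorem resFold_get? (lostL rl : List Int) : ∀ (seen : List Int) (d : PySem.Dict Int Int),
    (∀ j : Int, d.get? j = balVal (decide (j ∈ lostL)) (decide (j ∈ seen))) →
    ∀ j : Int, ((rl.foldl (fun d x => d.insert x (if d.getD x 1 != 1 then (0 : Int) else 1)) d).get? j)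
      = balVal (decide (j ∈ lostL)) (decide (j ∈ seen ++ rl)) := by
  induction rl with
  | nil => exact fun seen d hd j => by simpa using hd j
  | cons x xs ih =>
    intro seen d hd j
    rw [List.foldl_cons]
    have hv : (if d.getD x 1 != 1 then (0 : Int) else 1) = (if x ∈ lostL then 0 else 1) := by
      rw [PySem.Dict.getD_eq_get?_getD, hd x]
      by_cases hl : x ∈ lostL <;> by_cases hs : x ∈ seen <;> simp [balVal, hl, hs]
    have hd' : ∀ j : Int, (d.insert x (if d.getD x 1 != 1 then (0 : Int) else 1)).get? j
        = balVal (decide (j ∈ lostL)) (decide (j ∈ seen ++ [x])) := by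
      intro j
      rw [PySem.Dict.get?_insert, hv]
      by_cases hjx : j = x
      · subst hjx; simp [balVal]
      · rw [if_neg hjx, hd j]
        have : decide (j ∈ seen ++ [x]) = decide (j ∈ seen) :=
          decide_eq_decide.mpr (by simp [hjx])
        rw [this]
    have h2 := ih (seen ++ [x]) _ hd' j
    rw [h2]
    have : decide (j ∈ seen ++ [x] ++ xs) = decide (j ∈ seen ++ x :: xs) :=
      decide_eq_decide.mpr (by simp)
    rw [this]

theorem sweepEq (Lp ks : List Int) : ∀ (d : PySem.Dict Int Int) (S : PySem.Set Int) (u : Int),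
    (∀ j : Int, d.get? j = some 1 ↔ j ∈ S) →
    (∀ i ∈ ks, (d.getD i 0 = -1 ↔ i ∈ Lp)) →
    (∀ x ∈ S, x ∉ Lp) → ks.Nodup →
    (ks.foldl stepSweep (d, u)).2 = u + runB (ks.filter (fun i => decide (i ∈ Lp))) S := by
  induction ks with
  | nil => intro d S u _ _ _ _; simp [runB]
  | cons i ks ih =>
    intro d S u hS hL hdisj hnd
    have hnd' : ks.Nodup := (List.nodup_cons.1 hnd).2
    have hik : i ∉ ks := (List.nodup_cons.1 hnd).1
    rw [List.foldl_cons]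
    by_cases hneed : d.getD i 0 = -1
    · have hiLp : i ∈ Lp := (hL i (by simp)).1 hneed
      have hfil : (i :: ks).filter (fun i => decide (i ∈ Lp))
          = i :: ks.filter (fun i => decide (i ∈ Lp)) := by simp [hiLp]
      rw [hfil]
      by_cases hs1 : (i - 1) ∈ S
      · have hg1 : d.get? (i - 1) = some 1 := (hS _).2 hs1
        have hstep : stepSweep (d, u) i = ((d.insert (i - 1) 0).insert i 0, u) := by
          simp [stepSweep, hneed, hg1]
        rw [hstep, runB, if_pos hs1]
        apply ih
        · intro j
          rw [PySem.Dict.get?_insert, PySem.Dict.get?_insert]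
          by_cases hji : j = i
          · rw [if_pos hji]
            constructor
            · intro h; simp at h
            · intro h
              exact absurd hiLp (hdisj i (hji ▸ ((PySem.Set.mem_discard S (i-1) j).1 h).1))
          · rw [if_neg hji]
            by_cases hj1 : j = i - 1
            · rw [if_pos hj1]
              constructor
              · intro h; simp at h
              · intro h; exact absurd ((PySem.Set.mem_discard S (i-1) j).1 h).2 (by simp [hj1])
            · rw [if_neg hj1, hS j, PySem.Set.mem_discard]
              constructor
              · intro h; exact ⟨h, hj1⟩
              · exact fun h => h.1
        · intro t ht
          rw [PySem.Dict.getD_insert, PySem.Dict.getD_insert]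
          have hti : t ≠ i := fun e => hik (e ▸ ht)
          rw [if_neg hti]
          by_cases ht1 : t = i - 1
          · rw [if_pos ht1]
            constructor
            · intro h; exact absurd h (by norm_num)
            · intro h; exact absurd (ht1 ▸ h) (hdisj _ hs1)
          · rw [if_neg ht1]; exact hL t (by simp [ht])
        · intro x hx
          exact hdisj x ((PySem.Set.mem_discard S (i-1) x).1 hx).1
        · exact hnd'
      · have hg1 : ¬ d.get? (i - 1) = some 1 := fun h => hs1 ((hS _).1 h)
        by_cases hs2 : (i + 1) ∈ S
        · have hg2 : d.get? (i + 1) = some 1 := (hS _).2 hs2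
          have hstep : stepSweep (d, u) i = ((d.insert (i + 1) 0).insert i 0, u) := by
            simp [stepSweep, hneed, hg1, hg2]
          rw [hstep, runB, if_neg hs1, if_pos hs2]
          apply ih
          · intro j
            rw [PySem.Dict.get?_insert, PySem.Dict.get?_insert]
            by_cases hji : j = i
            · rw [if_pos hji]
              constructor
              · intro h; simp at h
              · intro h
                exact absurd hiLp (hdisj i (hji ▸ ((PySem.Set.mem_discard S (i+1) j).1 h).1))
            · rw [if_neg hji]
              by_cases hj1 : j = i + 1
              · rw [if_pos hj1]
                constructor
                · intro h; simp at h
                · intro h; exact absurd ((PySem.Set.mem_discard S (i+1) j).1 h).2 (by simp [hj1])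
              · rw [if_neg hj1, hS j, PySem.Set.mem_discard]
                constructor
                · intro h; exact ⟨h, hj1⟩
                · exact fun h => h.1
          · intro t ht
            rw [PySem.Dict.getD_insert, PySem.Dict.getD_insert]
            have hti : t ≠ i := fun e => hik (e ▸ ht)
            rw [if_neg hti]
            by_cases ht1 : t = i + 1
            · rw [if_pos ht1]
              constructor
              · intro h; exact absurd h (by norm_num)
              · intro h; exact absurd (ht1 ▸ h) (hdisj _ hs2)
            · rw [if_neg ht1]; exact hL t (by simp [ht])
          · intro x hx
            exact hdisj x ((PySem.Set.mem_discard S (i+1) x).1 hx).1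
          · exact hnd'
        · have hg2 : ¬ d.get? (i + 1) = some 1 := fun h => hs2 ((hS _).1 h)
          have hstep : stepSweep (d, u) i = (d, u + 1) := by
            simp [stepSweep, hneed, hg1, hg2]
          rw [hstep, runB, if_neg hs1, if_neg hs2]
          have := ih d S (u + 1) hS (fun t ht => hL t (by simp [ht])) hdisj hnd'
          rw [this]; ring
    · have hiLp : i ∉ Lp := fun h => hneed ((hL i (by simp)).2 h)
      have hfil : (i :: ks).filter (fun i => decide (i ∈ Lp))
          = ks.filter (fun i => decide (i ∈ Lp)) := by simp [hiLp]
      have hstep : stepSweep (d, u) i = (d, u) := by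
        simp [stepSweep, hneed]
      rw [hfil, hstep]
      exact ih d S u hS (fun t ht => hL t (by simp [ht])) hdisj hnd'

-- the two counts agree: A's surviving lost set vs B's unmatched counter
theorem main (lost reserve : List Int) :
    PySem.Set.len ((PySem.List.sorted (PySem.Set.diff (PySem.Set.ofList reserve) (PySem.Set.inter (PySem.Set.ofList reserve) (PySem.Set.ofList lost))) (fun x => x)).foldl stepA (PySem.Set.diff (PySem.Set.ofList lost) (PySem.Set.inter (PySem.Set.ofList reserve) (PySem.Set.ofList lost))))
    = ((PySem.List.sorted (List.foldl (fun d x => d.insert x (if d.getD x 1 != 1 then (0 : Int) else 1)) (List.foldl (fun d x => d.insert x (-1 : Int)) PySem.Dict.empty lost) reserve).keys (fun x => x)).foldl stepSweep (List.foldl (fun d x => d.insert x (if d.getD x 1 != 1 then (0 : Int) else 1)) (List.foldl (fun d x => d.insert x (-1 : Int)) PySem.Dict.empty lost) reserve, 0)).2 := by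
  set I := PySem.Set.inter (PySem.Set.ofList reserve) (PySem.Set.ofList lost) with hI
  set Rr := PySem.Set.diff (PySem.Set.ofList reserve) I with hRr
  set Lr := PySem.Set.diff (PySem.Set.ofList lost) I with hLr
  set rsA := PySem.List.sorted Rr (fun x => x) with hrsA
  set lsC := PySem.List.sorted Lr (fun x => x) with hlsC
  set bal0 := List.foldl (fun d x => d.insert x (-1 : Int)) PySem.Dict.empty lost with hbal0
  set bal := List.foldl (fun (d : PySem.Dict Int Int) x => d.insert x (if d.getD x 1 != 1 then (0 : Int) else 1)) bal0 reserve with hbal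
  set ks := PySem.List.sorted bal.keys (fun x => x) with hks
  -- balance values
  have hd0 : ∀ j : Int, bal0.get? j = balVal (decide (j ∈ lost)) (decide (j ∈ ([] : List Int))) := by
    intro j
    rw [hbal0, lostFold_get?]
    by_cases hj : j ∈ lost <;> simp [balVal, hj]
  have hbalv : ∀ j : Int, bal.get? j = balVal (decide (j ∈ lost)) (decide (j ∈ reserve)) := by
    intro j
    exact resFold_get? lost reserve [] bal0 hd0 j
  -- membership characterizations
  have hmLr : ∀ x : Int, x ∈ Lr ↔ (x ∈ lost ∧ x ∉ reserve) := by
    intro x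
    simp only [hLr, PySem.Set.mem_diff, hI, PySem.Set.mem_inter, PySem.Set.mem_ofList]
    tauto
  have hmRr : ∀ x : Int, x ∈ Rr ↔ (x ∈ reserve ∧ x ∉ lost) := by
    intro x
    simp only [hRr, PySem.Set.mem_diff, hI, PySem.Set.mem_inter, PySem.Set.mem_ofList]
    tauto
  have hmrsA : ∀ x : Int, x ∈ rsA ↔ (x ∈ reserve ∧ x ∉ lost) := by
    intro x
    rw [hrsA, (PySem.List.sorted_perm Rr (fun x => x) false).mem_iff, hmRr]
  have hmlsC : ∀ x : Int, x ∈ lsC ↔ (x ∈ lost ∧ x ∉ reserve) := by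
    intro x
    rw [hlsC, (PySem.List.sorted_perm Lr (fun x => x) false).mem_iff, hmLr]
  -- sweep hypotheses
  have hS : ∀ j : Int, bal.get? j = some 1 ↔ j ∈ rsA := by
    intro j
    rw [hbalv, hmrsA]
    by_cases hl : j ∈ lost <;> by_cases hr : j ∈ reserve <;> simp [balVal, hl, hr]
  have hLv : ∀ i : Int, bal.getD i 0 = -1 ↔ i ∈ lsC := by
    intro i
    rw [PySem.Dict.getD_eq_get?_getD, hbalv, hmlsC]
    by_cases hl : i ∈ lost <;> by_cases hr : i ∈ reserve <;> simp [balVal, hl, hr]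
  have hdisjS : ∀ x ∈ rsA, x ∉ lsC := by
    intro x hx hc
    rw [hmrsA] at hx
    rw [hmlsC] at hc
    exact hx.2 hc.1
  -- nodup and sortedness
  have hndRr : Rr.Nodup := PySem.Set.nodup_diff _ _ (PySem.Set.nodup_ofList reserve)
  have hndLr : Lr.Nodup := PySem.Set.nodup_diff _ _ (PySem.Set.nodup_ofList lost)
  have hndrsA : rsA.Nodup := ((PySem.List.sorted_perm Rr (fun x => x) false).nodup_iff).2 hndRr
  have hndlsC : lsC.Nodup := ((PySem.List.sorted_perm Lr (fun x => x) false).nodup_iff).2 hndLr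
  have hplt : ∀ (xs : List Int), (PySem.List.sorted xs (fun x => x) false).Nodup →
      List.Pairwise (· < ·) (PySem.List.sorted xs (fun x => x) false) := by
    intro xs hnd
    have hle := PySem.List.sorted_pairwise xs (fun x => x)
    exact (hle.and hnd).imp (fun h => lt_of_le_of_ne h.1 h.2)
  have hprsA : List.Pairwise (· < ·) rsA := hplt Rr hndrsA
  have hplsC : List.Pairwise (· < ·) lsC := hplt Lr hndlsC
  -- keys of bal
  have hndkeys : bal.keys.Nodup := by
    rw [hbal]
    apply PySem.Dict.nodup_keys_foldl_insert
    rw [hbal0]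
    apply PySem.Dict.nodup_keys_foldl_insert
    simp
  have hndks : ks.Nodup := ((PySem.List.sorted_perm bal.keys (fun x => x) false).nodup_iff).2 hndkeys
  have hpks : List.Pairwise (· < ·) ks := hplt bal.keys hndks
  -- the filtered sweep list is exactly lsC
  have hmks : ∀ x : Int, x ∈ ks ↔ (x ∈ lost ∨ x ∈ reserve) := by
    intro x
    rw [hks, (PySem.List.sorted_perm bal.keys (fun x => x) false).mem_iff]
    constructor
    · intro hk
      have : bal.get? x ≠ none := by
        rw [Ne, PySem.Dict.get?_eq_none_iff_not_mem_keys]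
        simpa using hk
      rw [hbalv] at this
      by_cases hl : x ∈ lost
      · exact Or.inl hl
      · by_cases hr : x ∈ reserve
        · exact Or.inr hr
        · simp [balVal, hl, hr] at this
    · intro hk
      by_contra hc
      have h1 : bal.get? x = none := (PySem.Dict.get?_eq_none_iff_not_mem_keys bal x).2 (by simpa using hc)
      rw [hbalv] at h1
      rcases hk with hl | hr
      · by_cases hr : x ∈ reserve <;> simp [balVal, hl, hr] at h1
      · by_cases hl : x ∈ lost <;> simp [balVal, hl, hr] at h1
  have hfil : ks.filter (fun i => decide (i ∈ lsC)) = lsC := by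
    have hndf : (ks.filter (fun i => decide (i ∈ lsC))).Nodup := hndks.filter _
    have hpf : List.Pairwise (· < ·) (ks.filter (fun i => decide (i ∈ lsC))) :=
      hpks.sublist List.filter_sublist
    have hperm : (ks.filter (fun i => decide (i ∈ lsC))).Perm lsC := by
      rw [List.perm_ext_iff_of_nodup hndf hndlsC]
      intro a
      rw [List.mem_filter]
      constructor
      · intro h
        exact of_decide_eq_true h.2
      · intro h
        refine ⟨?_, decide_eq_true h⟩
        rw [hmks]
        exact Or.inl ((hmlsC a).1 h).1
    exact List.Perm.eq_of_pairwise (fun a b _ _ h1 h2 => ((lt_asymm h1) h2).elim) hpf hplsC hperm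
  -- B side: sweep = runB lsC rsA
  have hsweep : ((ks.foldl stepSweep (bal, 0)).2 : Int) = runB lsC rsA := by
    rw [sweepEq lsC ks bal rsA 0 hS (fun i _ => hLv i) hdisjS hndks, hfil]
    ring
  -- A side: count = runB lsC rsA
  have hpermL : Lr.Perm lsC := ((PySem.List.sorted_perm Lr (fun x => x) false).symm)
  have hlen : (rsA.foldl stepA Lr).length = (rsA.foldl stepA lsC).length :=
    (foldA_perm rsA Lr lsC hpermL).length_eq
  have hdisjC : ∀ x ∈ lsC, x ∉ rsA := by
    intro x hx hc
    rw [hmlsC] at hx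
    rw [hmrsA] at hc
    exact hx.2 hc.1
  have hcore : ((rsA.foldl stepA lsC).length : Int) = runB lsC rsA :=
    core (lsC.length + rsA.length) lsC rsA (le_refl _) hplsC hprsA hdisjC
  show PySem.Set.len (rsA.foldl stepA Lr) = (ks.foldl stepSweep (bal, 0)).2
  rw [hsweep]
  unfold PySem.Set.len
  rw [hlen]
  exact hcore

-- ===== VERDICT (by name: the statement is the Claim_ definition above) =====
theorem solution_spec : Claim_equal_solution := by
  intro n lost reserve _
  exact congrArg (fun z => n - z) (main lost reserve)
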